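-- pv_equiv track=rewrite | github.com/miguelrodriguezboo/Streamlitpruebai | str/pages/Dealers.py | cortar_diccionario
-- ===== SOURCE A (Python) =====
-- def cortar_diccionario(start_value, end_value, diccionario):
--     nuevo_diccionario = {}
--     lista_claves = list(diccionario.keys())
--     tam_lista = len(lista_claves)
--     i = False
--     aux = 0
--
--     while (aux < tam_lista):
--         clave = lista_claves[aux]
--
--         if clave == start_value:
--             i = True
--         if i:
--             nuevo_diccionario[clave] = diccionario[clave]
--         if clave == end_value:
--             i = False
--
--         aux+=1
--
--     return nuevo_diccionario
-- ===== SOURCE B (Python) =====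
-- def cortar_diccionario(start_value, end_value, diccionario):
--     claves = list(diccionario)
--     if start_value not in claves:
--         return {}
--     cola = claves[claves.index(start_value):]
--     if end_value in cola:
--         cola = cola[:cola.index(end_value) + 1]
--     return {c: diccionario[c] for c in cola}
-- ===== Notes on version B (the rewrite author's own statement) =====
-- stated objective: simpler
-- what changed: Replaces A's flag-driven while-loop (a boolean toggled on at start_value and off after end_value while copying) by an index-then-slice decomposition: find start_value's index, slice the tail, truncate it at the first end_value if present, and copy that slice; Pre_ only states the dict representation invariant (distinct keys in the association-list encoding), which excludes no Python input since a dict cannot carry duplicate keys.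
import Mathlib
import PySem

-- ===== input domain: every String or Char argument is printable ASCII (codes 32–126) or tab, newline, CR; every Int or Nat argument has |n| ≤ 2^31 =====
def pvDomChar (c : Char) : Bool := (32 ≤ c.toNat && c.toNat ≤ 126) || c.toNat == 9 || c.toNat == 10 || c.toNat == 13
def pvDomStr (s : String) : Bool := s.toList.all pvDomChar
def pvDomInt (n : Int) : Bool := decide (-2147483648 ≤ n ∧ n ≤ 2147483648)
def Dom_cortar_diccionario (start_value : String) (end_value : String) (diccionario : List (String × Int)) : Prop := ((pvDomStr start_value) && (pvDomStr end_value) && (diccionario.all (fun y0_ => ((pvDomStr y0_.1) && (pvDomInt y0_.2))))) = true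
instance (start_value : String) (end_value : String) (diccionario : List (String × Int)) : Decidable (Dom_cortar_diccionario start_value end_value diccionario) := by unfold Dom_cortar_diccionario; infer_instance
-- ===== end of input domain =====

-- B replaces A's flag-driven single pass by an index-then-slice decomposition (simpler); same values everywhere.

-- ===== PORT A =====
-- Literal port of A: while-loop over the key list with the flag i and the dict
-- nuevo_diccionario as fold state.  diccionario[clave] is ported with getD:
-- exact here, since clave is drawn from diccionario's own keys (no KeyError).
def cortar_diccionario (start_value : String) (end_value : String) (diccionario : List (String × Int)) : List (String × Int) :=
  let lista_claves := diccionario.map Prod.fst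
  let final := lista_claves.foldl
    (fun (st : PySem.Dict String Int × Bool) clave =>
      let i := if clave = start_value then true else st.2
      let nd := if i then st.1.insert clave ((PySem.Dict.mk diccionario).getD clave 0) else st.1
      (nd, if clave = end_value then false else i))
    (PySem.Dict.empty, false)
  final.1.items

-- ===== PORT B =====
-- Port of Source B: 'start_value not in claves' / '.index' is the single match on
-- PySem.List.index?; the two slices are PySem.List.slice; the dict
-- comprehension is a foldl of inserts (lookup exact as above).
def cortar_diccionario_alt (start_value : String) (end_value : String) (diccionario : List (String × Int)) : List (String × Int) :=
  let claves := diccionario.map Prod.fst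
  match PySem.List.index? claves start_value with
  | none => []
  | some si =>
    let cola := PySem.List.slice claves (some (si : Int)) none
    let cola := match PySem.List.index? cola end_value with
      | none => cola
      | some j => PySem.List.slice cola none (some ((j : Int) + 1))
    (cola.foldl (fun nd c => nd.insert c ((PySem.Dict.mk diccionario).getD c 0)) (PySem.Dict.empty : PySem.Dict String Int)).items

-- ===== PRECONDITION & SPEC =====
-- Pre_ requires the association list's keys to be distinct: that is the
-- representation invariant of the Python dict argument (a Python dict can
-- never carry duplicate keys), so no Python input is excluded.
def Pre_cortar_diccionario (start_value : String) (end_value : String) (diccionario : List (String × Int)) : Prop :=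
  (diccionario.map Prod.fst).Nodup
instance (start_value : String) (end_value : String) (diccionario : List (String × Int)) : Decidable (Pre_cortar_diccionario start_value end_value diccionario) := by unfold Pre_cortar_diccionario; infer_instance

def pvWitness_cortar_diccionario : String × String × (List (String × Int)) := ("a", "b", [("a", 1), ("b", 2), ("c", 3)])

def Spec_cortar_diccionario (start_value : String) (end_value : String) (diccionario : List (String × Int)) (out : List (String × Int)) : Prop := out = cortar_diccionario_alt start_value end_value diccionario
instance (start_value : String) (end_value : String) (diccionario : List (String × Int)) (out : List (String × Int)) : Decidable (Spec_cortar_diccionario start_value end_value diccionario out) := by unfold Spec_cortar_diccionario; infer_instance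

-- ===== CLAIM (what is proved, stated in full; the proofs are below) =====
def Claim_equal_cortar_diccionario : Prop := ∀ (start_value : String) (end_value : String) (diccionario : List (String × Int)), Dom_cortar_diccionario start_value end_value diccionario → Pre_cortar_diccionario start_value end_value diccionario → Spec_cortar_diccionario start_value end_value diccionario (cortar_diccionario start_value end_value diccionario)

-- ===== LEMMAS AND PROOFS =====

-- A's loop step, named for the proofs.
def aStep (sv ev : String) (d : List (String × Int)) (st : PySem.Dict String Int × Bool) (clave : String) : PySem.Dict String Int × Bool :=
  let i := if clave = sv then true else st.2
  let nd := if i then st.1.insert clave ((PySem.Dict.mk d).getD clave 0) else st.1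
  (nd, if clave = ev then false else i)

-- B's copy loop, named for the proofs.
def bCopy (d : List (String × Int)) (ks : List String) (nd : PySem.Dict String Int) : PySem.Dict String Int :=
  ks.foldl (fun nd c => nd.insert c ((PySem.Dict.mk d).getD c 0)) nd

theorem cortar_eq (sv ev : String) (d : List (String × Int)) :
    cortar_diccionario sv ev d = (((d.map Prod.fst).foldl (aStep sv ev d) (PySem.Dict.empty, false)).1).items := rfl

theorem alt_eq (sv ev : String) (d : List (String × Int)) :
    cortar_diccionario_alt sv ev d =
      match PySem.List.index? (d.map Prod.fst) sv with
      | none => []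
      | some si =>
        (bCopy d
          (match PySem.List.index? (PySem.List.slice (d.map Prod.fst) (some (si : Int)) none) ev with
           | none => PySem.List.slice (d.map Prod.fst) (some (si : Int)) none
           | some j => PySem.List.slice (PySem.List.slice (d.map Prod.fst) (some (si : Int)) none) none (some ((j : Int) + 1)))
          PySem.Dict.empty).items := rfl

-- the segment Source B cuts out of a tail list
def seg (ev : String) (l : List String) : List String :=
  match PySem.List.index? l ev with
  | none => l
  | some j => l.take (j + 1)

-- while the flag is off and sv does not occur, A's loop does nothing
theorem foldl_aStep_off (sv ev : String) (d : List (String × Int)) (l : List String)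
    (h : sv ∉ l) (nd : PySem.Dict String Int) :
    l.foldl (aStep sv ev d) (nd, false) = (nd, false) := by
  induction l with
  | nil => rfl
  | cons c l ih =>
    have hc : c ≠ sv := fun hcs => h (hcs ▸ List.mem_cons_self)
    have h' : sv ∉ l := fun hm => h (List.mem_cons_of_mem _ hm)
    simp only [List.foldl_cons, aStep, if_neg hc, Bool.false_eq_true, if_false, ite_self]
    exact ih h'

-- while the flag is on, A's loop copies exactly seg ev l (sv absent from l)
theorem foldl_aStep_on (sv ev : String) (d : List (String × Int)) (l : List String)
    (h : sv ∉ l) (nd : PySem.Dict String Int) :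
    (l.foldl (aStep sv ev d) (nd, true)).1 = bCopy d (seg ev l) nd := by
  induction l generalizing nd with
  | nil => rfl
  | cons c l ih =>
    have hc : c ≠ sv := fun hcs => h (hcs ▸ List.mem_cons_self)
    have h' : sv ∉ l := fun hm => h (List.mem_cons_of_mem _ hm)
    by_cases hce : c = ev
    · subst hce
      simp only [List.foldl_cons, aStep, if_neg hc, if_true, eq_self_iff_true]
      rw [foldl_aStep_off sv c d l h']
      simp only [seg]
      rw [PySem.List.index?_cons_self]
      rfl
    · simp only [List.foldl_cons, aStep, if_neg hc, if_neg hce, if_true, eq_self_iff_true]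
      rw [ih h']
      simp only [seg]
      rw [PySem.List.index?_cons_of_ne l hce]
      cases hj : PySem.List.index? l ev with
      | none => simp [bCopy]
      | some j => simp [bCopy]

theorem cortar_diccionario_main (sv ev : String) (d : List (String × Int))
    (hnd : (d.map Prod.fst).Nodup) :
    cortar_diccionario sv ev d = cortar_diccionario_alt sv ev d := by
  rw [cortar_eq, alt_eq]
  cases hidx : PySem.List.index? (d.map Prod.fst) sv with
  | none =>
    have hout : sv ∉ d.map Prod.fst := (PySem.List.index?_eq_none_iff _ _).1 hidx
    rw [foldl_aStep_off sv ev d _ hout]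
    rfl
  | some si =>
    obtain ⟨pre, suf, hsplit, hlen, hpre⟩ := (PySem.List.index?_eq_some_iff _ _ _).1 hidx
    have hsuf : sv ∉ suf := by
      rw [hsplit] at hnd
      have := (List.nodup_append.1 hnd).2.1
      exact fun hm => (List.nodup_cons.1 this).1 hm
    have hslice1 : PySem.List.slice (d.map Prod.fst) (some (si : Int)) none = sv :: suf := by
      rw [hsplit, PySem.List.slice_from_natCast, ← hlen, List.drop_left]
    simp only [hslice1]
    conv_lhs => rw [hsplit]
    rw [List.foldl_append, foldl_aStep_off sv ev d pre hpre]
    simp only [List.foldl_cons, aStep, if_true, eq_self_iff_true]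
    by_cases hse : sv = ev
    · subst hse
      rw [if_pos rfl, foldl_aStep_off sv sv d suf hsuf]
      rw [PySem.List.index?_cons_self]
      have hsl : PySem.List.slice (sv :: suf) none (some 1) = [sv] := by
        simpa using PySem.List.slice_to_natCast (sv :: suf) 1
      simp [bCopy, hsl]
    · rw [if_neg hse, foldl_aStep_on sv ev d suf hsuf]
      rw [PySem.List.index?_cons_of_ne suf hse]
      cases hj : PySem.List.index? suf ev with
      | none =>
        simp only [Option.map_none]
        simp only [seg]
        rw [hj]
        simp [bCopy]
      | some j =>
        simp only [Option.map_some]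
        have h2 : ((↑(j + 1) : Int) + 1) = ((j + 2 : Nat) : Int) := by push_cast; ring
        rw [h2, PySem.List.slice_to_natCast]
        simp only [seg]
        rw [hj]
        simp [bCopy, List.take_succ_cons]

-- ===== VERDICT (by name: the statement is the Claim_ definition above) =====
theorem cortar_diccionario_spec : Claim_equal_cortar_diccionario := by
  intro sv ev d _ hpre
  unfold Spec_cortar_diccionario
  exact cortar_diccionario_main sv ev d hpre
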